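-- pv_equiv track=rewrite | github.com/pedroaston/contentpubsub | scraper.py | getEdgeWeights
-- ===== SOURCE A (Python) =====
-- def getEdgeWeights(kPhraseList):
-- 	edgeWeights = {}
--
-- 	for sentence in kPhraseList:
-- 		for wordOrig in sentence:
-- 			for wordDest in sentence:
-- 				if wordOrig != wordDest:
-- 					if wordOrig+" "+wordDest not in edgeWeights:
-- 						edgeWeights[wordOrig+" "+wordDest] = 1
-- 					else:
-- 						edgeWeights[wordOrig+" "+wordDest] += 1
--
-- 	return edgeWeights
-- ===== SOURCE B (Python) =====
-- def getEdgeWeights(kPhraseList):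
--     edgeWeights = {}
--     for sentence in kPhraseList:
--         counts = {}
--         for w in sentence:
--             counts[w] = counts.get(w, 0) + 1
--         for a, ca in counts.items():
--             for b, cb in counts.items():
--                 if a != b:
--                     key = a + " " + b
--                     edgeWeights[key] = edgeWeights.get(key, 0) + ca * cb
--     return edgeWeights
-- ===== Notes on version B (the rewrite author's own statement) =====
-- stated objective: alternative
-- what changed: Per sentence B first builds a word-frequency table and then adds count_a*count_b per ordered pair of distinct table keys, instead of scanning every ordered pair of word positions.
import Mathlib
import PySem

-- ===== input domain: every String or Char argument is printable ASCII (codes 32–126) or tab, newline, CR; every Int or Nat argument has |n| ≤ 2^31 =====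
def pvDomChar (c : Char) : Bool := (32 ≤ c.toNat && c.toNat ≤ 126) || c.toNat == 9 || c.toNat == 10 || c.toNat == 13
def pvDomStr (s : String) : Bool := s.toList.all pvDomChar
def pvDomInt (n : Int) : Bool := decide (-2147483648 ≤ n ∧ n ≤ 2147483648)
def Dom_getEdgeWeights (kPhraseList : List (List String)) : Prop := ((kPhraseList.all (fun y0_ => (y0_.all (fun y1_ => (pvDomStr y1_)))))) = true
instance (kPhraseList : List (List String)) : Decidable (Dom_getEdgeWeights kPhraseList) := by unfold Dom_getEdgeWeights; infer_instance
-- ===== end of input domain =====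

-- B replaces A's scan over every ordered pair of word POSITIONS per sentence by a per-sentence
-- frequency table and a scan over ordered pairs of its distinct KEYS, adding count_a*count_b at once.

-- ===== PORT A =====
def getEdgeWeights (kPhraseList : List (List String)) : List (String × Int) :=
  (kPhraseList.foldl (fun edgeWeights sentence =>
    sentence.foldl (fun edgeWeights wordOrig =>
      sentence.foldl (fun edgeWeights wordDest =>
        if wordOrig ≠ wordDest then
          if edgeWeights.contains (wordOrig ++ " " ++ wordDest) = false then
            edgeWeights.insert (wordOrig ++ " " ++ wordDest) 1
          else
            edgeWeights.insert (wordOrig ++ " " ++ wordDest)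
              (edgeWeights.getD (wordOrig ++ " " ++ wordDest) 0 + 1)
        else edgeWeights) edgeWeights) edgeWeights)
    (PySem.Dict.empty : PySem.Dict String Int)).items

-- ===== PORT B =====
def getEdgeWeights_alt (kPhraseList : List (List String)) : List (String × Int) :=
  (kPhraseList.foldl (fun edgeWeights sentence =>
    let counts : PySem.Dict String Int :=
      sentence.foldl (fun counts w => counts.insert w (counts.getD w 0 + 1)) PySem.Dict.empty
    counts.items.foldl (fun edgeWeights pa =>
      counts.items.foldl (fun edgeWeights pb =>
        if pa.1 ≠ pb.1 then
          edgeWeights.insert (pa.1 ++ " " ++ pb.1)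
            (edgeWeights.getD (pa.1 ++ " " ++ pb.1) 0 + pa.2 * pb.2)
        else edgeWeights) edgeWeights) edgeWeights)
    (PySem.Dict.empty : PySem.Dict String Int)).items

-- ===== PRECONDITION & SPEC =====
def Spec_getEdgeWeights (kPhraseList : List (List String)) (out : List (String × Int)) : Prop := out = getEdgeWeights_alt kPhraseList
instance (kPhraseList : List (List String)) (out : List (String × Int)) : Decidable (Spec_getEdgeWeights kPhraseList out) := by unfold Spec_getEdgeWeights; infer_instance

-- ===== CLAIM (what is proved, stated in full; the proofs are below) =====
def Claim_equal_getEdgeWeights : Prop := ∀ (kPhraseList : List (List String)), Dom_getEdgeWeights kPhraseList → Spec_getEdgeWeights kPhraseList (getEdgeWeights kPhraseList)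

-- ===== LEMMAS AND PROOFS =====

def pvAddN (d : PySem.Dict String Int) (p : String × Int) : PySem.Dict String Int :=
  d.insert p.1 (d.getD p.1 0 + p.2)
def pvRun (d : PySem.Dict String Int) (L : List (String × Int)) : PySem.Dict String Int :=
  L.foldl pvAddN d
def pvSumW (L : List (String × Int)) (k : String) : Int :=
  ((L.filter (fun p => p.1 == k)).map (·.2)).sum

lemma pvRun_nodup (d : PySem.Dict String Int) (L : List (String × Int)) (h : d.keys.Nodup) :
    (pvRun d L).keys.Nodup := by
  simp only [pvRun, pvAddN]
  exact PySem.Dict.nodup_keys_foldl_insert_key L (fun p => p.1) (fun d p => d.getD p.1 0 + p.2) d h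

lemma pvFoldl_guard {α : Type} (l : List α) (P : α → Bool) (g : α → String × Int)
    (d : PySem.Dict String Int) :
    l.foldl (fun d x => if P x then pvAddN d (g x) else d) d = pvRun d ((l.filter P).map g) := by
  induction l generalizing d with
  | nil => rfl
  | cons x l ih =>
    by_cases hx : P x <;> simp [List.filter_cons, hx, pvRun, ih]

lemma pvRun_append (d : PySem.Dict String Int) (L1 L2 : List (String × Int)) :
    pvRun d (L1 ++ L2) = pvRun (pvRun d L1) L2 := List.foldl_append ..

lemma pvFoldl_run_flatMap {α : Type} (l : List α) (rows : α → List (String × Int))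
    (d : PySem.Dict String Int) :
    l.foldl (fun d x => pvRun d (rows x)) d = pvRun d (l.flatMap rows) := by
  induction l generalizing d with
  | nil => rfl
  | cons x l ih =>
    rw [List.foldl_cons, List.flatMap_cons, pvRun_append]
    exact ih _

lemma pvSumW_cons (p : String × Int) (L : List (String × Int)) (k : String) :
    pvSumW (p :: L) k = (if p.1 = k then p.2 else 0) + pvSumW L k := by
  by_cases h : p.1 = k <;> simp [pvSumW, List.filter_cons, h]

lemma pvDedup_cons {α : Type} [BEq α] [LawfulBEq α] (x : α) (xs : List α) :
    PySem.List.dedup (x :: xs) = x :: (PySem.List.dedup xs).filter (fun y => !(y == x)) := by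
  have h1 : (x :: xs) = [x] ++ xs := rfl
  rw [PySem.List.dedup, h1, PySem.Set.ofList_append]
  have h2 : PySem.Set.ofList [x] = [x] := rfl
  rw [h2, PySem.Set.update_eq_append_filter]
  rw [PySem.List.dedup, List.singleton_append]
  congr 1
  apply List.filter_congr
  intro y _
  simp [PySem.Set.contains, beq_iff_eq, eq_comm]

lemma pvDedup_append {α : Type} [BEq α] [LawfulBEq α] (xs ys : List α) :
    PySem.List.dedup (xs ++ ys)
      = PySem.List.dedup xs ++ (PySem.List.dedup ys).filter (fun y => !(xs.contains y)) := by
  rw [PySem.List.dedup, PySem.Set.ofList_append, PySem.Set.update_eq_append_filter]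
  rw [PySem.List.dedup, PySem.List.dedup]
  congr 1
  apply List.filter_congr
  intro y _
  simp [PySem.Set.contains, PySem.Set.mem_ofList, List.contains_iff_mem]

lemma pvDedup_of_nodup {α : Type} [BEq α] [LawfulBEq α] (l : List α) (h : l.Nodup) :
    PySem.List.dedup l = l := by
  induction l with
  | nil => rfl
  | cons x l ih =>
    rw [pvDedup_cons, ih h.of_cons]
    have hx : x ∉ l := (List.nodup_cons.mp h).1
    congr 1
    apply List.filter_eq_self.mpr
    intro y hy
    simp only [bne_iff_ne, ne_eq, Bool.not_eq_eq_eq_not, Bool.not_true, beq_eq_false_iff_ne]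
    rintro rfl; exact hx hy
  
lemma pvDedup_idem {α : Type} [BEq α] [LawfulBEq α] (l : List α) :
    PySem.List.dedup (PySem.List.dedup l) = PySem.List.dedup l :=
  pvDedup_of_nodup _ (PySem.Set.nodup_ofList l)

lemma pvMem_dedup {α : Type} [BEq α] [LawfulBEq α] (l : List α) (y : α) :
    y ∈ PySem.List.dedup l ↔ y ∈ l := PySem.Set.mem_ofList l y

lemma pvFilter_comm {α : Type} (p q : α → Bool) (l : List α) :
    (l.filter p).filter q = (l.filter q).filter p := by
  rw [List.filter_filter, List.filter_filter]
  apply List.filter_congr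
  intro y _
  exact Bool.and_comm _ _

lemma pvDedup_filter {α : Type} [BEq α] [LawfulBEq α] (p : α → Bool) (l : List α) :
    PySem.List.dedup (l.filter p) = (PySem.List.dedup l).filter p := by
  induction l with
  | nil => rfl
  | cons x l ih =>
    by_cases hx : p x
    · simp only [List.filter_cons, hx, if_true, pvDedup_cons, ih]
      rw [pvFilter_comm]
    · simp only [List.filter_cons, hx, Bool.false_eq_true, if_false, pvDedup_cons, ih,
        List.filter_filter]
      apply List.filter_congr
      intro y _
      by_cases hy : p y
      · have hyx : y ≠ x := by rintro rfl; exact hx hy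
        simp [hy, hyx]
      · simp [hy]

lemma pvDedup_map_inj {α β : Type} [BEq α] [LawfulBEq α] [BEq β] [LawfulBEq β]
    (f : α → β) (hf : Function.Injective f) (l : List α) :
    PySem.List.dedup (l.map f) = (PySem.List.dedup l).map f := by
  induction l with
  | nil => rfl
  | cons x l ih =>
    rw [List.map_cons, pvDedup_cons, pvDedup_cons, ih, List.map_cons, List.filter_map]
    congr 2
    apply List.filter_congr
    intro y _
    by_cases hy : y = x
    · subst hy; simp only [Function.comp_apply, beq_self_eq_true]
    · have hfy : f y ≠ f x := fun h => hy (hf h)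
      simp [Function.comp_apply, hy, hfy]

lemma pvDedup_flatMap_congr {α : Type} (f g : α → List String) (l : List α)
    (h : ∀ x ∈ l, PySem.List.dedup (f x) = PySem.List.dedup (g x)) :
    PySem.List.dedup (l.flatMap f) = PySem.List.dedup (l.flatMap g) := by
  induction l with
  | nil => rfl
  | cons x l ih =>
    rw [List.flatMap_cons, List.flatMap_cons, pvDedup_append, pvDedup_append]
    have hx := h x (by simp)
    rw [hx, ih (fun y hy => h y (by simp [hy]))]
    congr 1
    apply List.filter_congr
    intro y _
    have : y ∈ f x ↔ y ∈ g x := by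
      rw [← pvMem_dedup (f x) y, ← pvMem_dedup (g x) y, hx]
    simp [this]

lemma pvDedup_flatMap_filter (f : String → List String) (x : String) (m : List String) :
    (PySem.List.dedup (m.flatMap f)).filter (fun y => !((f x).contains y))
      = (PySem.List.dedup ((m.filter (fun z => !(z == x))).flatMap f)).filter
          (fun y => !((f x).contains y)) := by
  induction m with
  | nil => rfl
  | cons z m ih =>
    rw [List.filter_cons]
    by_cases hz : z = x
    · subst hz
      simp only [BEq.rfl, Bool.not_true, Bool.false_eq_true, if_false]
      rw [List.flatMap_cons, pvDedup_append, List.filter_append, List.filter_filter]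
      have h1 : (PySem.List.dedup (f z)).filter (fun y => !((f z).contains y)) = [] := by
        apply List.filter_eq_nil_iff.mpr
        intro y hy
        have hmem : y ∈ f z := (pvMem_dedup (f z) y).mp hy
        simp [List.contains_iff_mem, hmem]
      rw [h1, List.nil_append]
      rw [show (fun y => !(f z).contains y && !(f z).contains y) = (fun y => !((f z).contains y))
        from funext (fun y => Bool.and_self _)]
      exact ih
    · have hz' : (!(z == x)) = true := by simp [hz]
      simp only [hz', if_true]
      rw [List.flatMap_cons, List.flatMap_cons, pvDedup_append, pvDedup_append,
        List.filter_append, List.filter_append]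
      congr 1
      rw [pvFilter_comm, ih, pvFilter_comm]

lemma pvDedup_flatMap_dedup (f : String → List String) (l : List String) :
    PySem.List.dedup (l.flatMap f) = PySem.List.dedup ((PySem.List.dedup l).flatMap f) := by
  induction l with
  | nil => rfl
  | cons x l ih =>
    rw [List.flatMap_cons, pvDedup_cons, List.flatMap_cons, pvDedup_append, pvDedup_append, ih]
    congr 1
    exact pvDedup_flatMap_filter f x (PySem.List.dedup l)

lemma pvSum_split (m : List String) (g : String → Int) (x : String) (hm : m.Nodup) :
    (m.map g).sum
      = (if x ∈ m then g x else 0) + ((m.filter (fun y => !(y == x))).map g).sum := by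
  by_cases hx : x ∈ m
  · have hperm : m.Perm (x :: m.erase x) := List.perm_cons_erase hx
    have := (hperm.map g).sum_eq
    rw [this, List.map_cons, List.sum_cons, hm.erase_eq_filter x, if_pos hx]
    rfl
  · rw [if_neg hx, List.filter_eq_self.mpr, Int.zero_add]
    intro y hy
    simp only [bne_iff_ne, ne_eq, Bool.not_eq_eq_eq_not, Bool.not_true, beq_eq_false_iff_ne]
    rintro rfl; exact hx hy

lemma pvSum_count (l : List String) (h : String → Int) :
    (l.map h).sum
      = ((PySem.List.dedup l).map (fun a => (l.count a : Int) * h a)).sum := by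
  induction l with
  | nil => rfl
  | cons x l ih =>
    rw [List.map_cons, List.sum_cons, ih, pvDedup_cons, List.map_cons, List.sum_cons,
      pvSum_split (PySem.List.dedup l) (fun a => (l.count a : Int) * h a) x
        (PySem.Set.nodup_ofList l)]
    have hcongr : ((PySem.List.dedup l).filter (fun y => !(y == x))).map
          (fun a => (((x :: l).count a : Int)) * h a)
        = ((PySem.List.dedup l).filter (fun y => !(y == x))).map
          (fun a => ((l.count a : Int)) * h a) := by
      apply List.map_congr_left
      intro a ha
      have hax : a ≠ x := by
        have := (List.mem_filter.mp ha).2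
        simpa using this
      simp only [List.count_cons]
      have hxa : ¬x = a := fun hh => hax hh.symm
      simp [hxa]
    rw [hcongr, List.count_cons_self]
    by_cases hx : x ∈ l
    · rw [if_pos ((pvMem_dedup l x).mpr hx)]; push_cast; ring
    · rw [if_neg (fun hc => hx ((pvMem_dedup l x).mp hc)), List.count_eq_zero_of_not_mem hx]
      simp

lemma pvRun_items (L : List (String × Int)) (d : PySem.Dict String Int) (hnd : d.keys.Nodup) :
    (pvRun d L).items
      = d.items.map (fun p => (p.1, p.2 + pvSumW L p.1))
        ++ ((PySem.List.dedup (L.map (·.1))).filter (fun k => !(d.contains k))).map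
             (fun k => (k, pvSumW L k)) := by
  induction L generalizing d with
  | nil =>
    simp [pvRun, pvSumW, PySem.List.dedup, PySem.Set.ofList]
  | cons p L ih =>
    have hstep : pvRun d (p :: L) = pvRun (pvAddN d p) L := rfl
    rw [hstep, ih (pvAddN d p) (PySem.Dict.nodup_keys_insert d p.1 _ hnd)]
    rw [List.map_cons, pvDedup_cons]
    have hfil : (PySem.List.dedup (L.map (·.1))).filter (fun k => !(pvAddN d p).contains k)
        = ((PySem.List.dedup (L.map (·.1))).filter (fun y => !(y == p.1))).filter
            (fun k => !(d.contains k)) := by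
      rw [List.filter_filter]
      apply List.filter_congr
      intro k _
      rw [show pvAddN d p = d.insert p.1 (d.getD p.1 0 + p.2) from rfl,
        PySem.Dict.contains_insert]
      cases hkb : (k == p.1) <;> cases hck : d.contains k <;> simp
    have hmapnew : ∀ (m : List String), (∀ k ∈ m, (k == p.1) = false) →
        m.map (fun k => (k, pvSumW L k)) = m.map (fun k => (k, pvSumW (p :: L) k)) := by
      intro m hm
      apply List.map_congr_left
      intro k hk
      have hkp : p.1 ≠ k := by
        have := hm k hk
        intro hcon
        simp [hcon] at this
      rw [pvSumW_cons, if_neg hkp, Int.zero_add]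
    by_cases hc : d.contains p.1
    · have hitems : (pvAddN d p).items
          = d.items.map (fun q => if q.1 == p.1 then (p.1, d.getD p.1 0 + p.2) else q) :=
        PySem.Dict.items_insert_of_contains d _ hc
      rw [hitems, List.map_map, hfil]
      congr 1
      · apply List.map_congr_left
        intro q hq
        by_cases hqp : q.1 = p.1
        · have h1 : (q.1 == p.1) = true := by simp [hqp]
          have hget : d.getD p.1 0 = q.2 := by
            rw [← hqp]; exact PySem.Dict.getD_of_mem_items d (by simpa using hq) hnd 0
          simp only [Function.comp_apply, h1, if_true]
          rw [hget, pvSumW_cons, if_pos hqp.symm, hqp, Int.add_assoc]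
        · have h1 : (q.1 == p.1) = false := by simp [hqp]
          simp only [Function.comp_apply, h1, Bool.false_eq_true, if_false]
          rw [pvSumW_cons, if_neg (fun h => hqp h.symm), Int.zero_add]
      · rw [List.filter_cons]
        have hcf : (!(d.contains p.1)) = false := by simp [hc]
        simp only [hcf, Bool.false_eq_true, if_false]
        rw [List.filter_comm]
        apply hmapnew
        intro k hk
        have h2 := (List.mem_filter.mp hk).2
        simpa using h2
    · have hget : d.getD p.1 0 = 0 := PySem.Dict.getD_of_not_contains d 0 (by simpa using hc)
      have hitems : (pvAddN d p).items = d.items ++ [(p.1, d.getD p.1 0 + p.2)] :=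
        PySem.Dict.items_insert_of_not_contains d _ (by simpa using hc)
      rw [hitems, List.map_append, hfil, List.filter_cons]
      have hcb : (!(d.contains p.1)) = true := by simp [hc]
      rw [if_pos hcb, List.map_cons]
      have hfirst : d.items.map (fun q => (q.1, q.2 + pvSumW (p :: L) q.1))
          = d.items.map (fun q => (q.1, q.2 + pvSumW L q.1)) := by
        apply List.map_congr_left
        intro q hq
        have hqp : p.1 ≠ q.1 := by
          intro h
          have hmem : p.1 ∈ d.keys := h ▸ PySem.Dict.mem_keys_of_mem_items d hq
          exact hc ((PySem.Dict.contains_iff_mem_keys d p.1).mpr hmem)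
        rw [pvSumW_cons, if_neg hqp, Int.zero_add]
      rw [hfirst]
      simp only [List.map_cons, List.map_nil, List.append_assoc, List.nil_append,
        List.singleton_append]
      congr 2
      · rw [hget, Int.zero_add, pvSumW_cons, if_pos rfl]
      · rw [List.filter_comm]
        apply hmapnew
        intro k hk
        have h2 := (List.mem_filter.mp hk).2
        simpa using h2

def pvOpA (s : List String) : List (String × Int) :=
  s.flatMap (fun w => (s.filter (fun v => !(w == v))).map (fun v => (w ++ " " ++ v, (1 : Int))))

def pvOpB (s : List String) : List (String × Int) :=
  (PySem.Dict.counter s).items.flatMap (fun pa =>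
    ((PySem.Dict.counter s).items.filter (fun pb => !(pa.1 == pb.1))).map
      (fun pb => (pa.1 ++ " " ++ pb.1, pa.2 * pb.2)))

lemma pvSumW_append (L1 L2 : List (String × Int)) (k : String) :
    pvSumW (L1 ++ L2) k = pvSumW L1 k + pvSumW L2 k := by
  simp [pvSumW, List.filter_append]

lemma pvSumW_flatMap {α : Type} (l : List α) (rows : α → List (String × Int)) (k : String) :
    pvSumW (l.flatMap rows) k = (l.map (fun x => pvSumW (rows x) k)).sum := by
  induction l with
  | nil => simp [pvSumW]
  | cons x l ih => rw [List.flatMap_cons, pvSumW_append, ih, List.map_cons, List.sum_cons]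

lemma pvSumW_map_pair {α : Type} (l : List α) (key : α → String) (wt : α → Int) (k : String) :
    pvSumW (l.map (fun x => (key x, wt x))) k
      = (l.map (fun x => if key x = k then wt x else 0)).sum := by
  induction l with
  | nil => rfl
  | cons x l ih =>
    rw [List.map_cons, pvSumW_cons, ih, List.map_cons, List.sum_cons]

lemma pvSum_ite_filter {α : Type} (l : List α) (p : α → Bool) (g : α → Int) :
    ((l.filter p).map g).sum = (l.map (fun x => if p x then g x else 0)).sum := by
  induction l with
  | nil => rfl
  | cons x l ih =>
    rw [List.filter_cons]
    by_cases hx : p x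
    · simp only [hx, if_true, List.map_cons, List.sum_cons, ih]
    · simp only [hx, Bool.false_eq_true, if_false, List.map_cons, List.sum_cons, ih]
      omega

-- the per-pair contribution of (w, v) to the weight of key k
def pvF (k w v : String) : Int :=
  if w = v then 0 else (if w ++ " " ++ v = k then 1 else 0)

lemma pvSumW_rowA (s : List String) (w k : String) :
    pvSumW ((s.filter (fun v => !(w == v))).map (fun v => (w ++ " " ++ v, (1 : Int)))) k
      = (s.map (fun v => pvF k w v)).sum := by
  rw [pvSumW_map_pair, pvSum_ite_filter]
  apply congrArg
  apply List.map_congr_left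
  intro v _
  by_cases hwv : w = v
  · simp [pvF, hwv]
  · simp [pvF, hwv]

lemma pvSumW_opA (s : List String) (k : String) :
    pvSumW (pvOpA s) k = (s.map (fun w => (s.map (fun v => pvF k w v)).sum)).sum := by
  rw [pvOpA, pvSumW_flatMap]
  apply congrArg
  apply List.map_congr_left
  intro w _
  exact pvSumW_rowA s w k

lemma pvRowB (Ds : List String) (cnt : String → Int) (a : String) (ca : Int) (k : String) :
    pvSumW (((Ds.map (fun b => (b, cnt b))).filter (fun pb => !(a == pb.1))).map
        (fun pb => (a ++ " " ++ pb.1, ca * pb.2))) k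
      = ca * (Ds.map (fun b => cnt b * pvF k a b)).sum := by
  induction Ds with
  | nil => simp [pvSumW]
  | cons b Ds ih =>
    rw [List.map_cons, List.filter_cons]
    by_cases hab : a = b
    · have h1 : (!(a == ((b, cnt b) : String × Int).1)) = false := by simp [hab]
      simp only [h1, Bool.false_eq_true, if_false]
      rw [ih, List.map_cons, List.sum_cons]
      simp [pvF, hab]
    · have h1 : (!(a == ((b, cnt b) : String × Int).1)) = true := by simp [hab]
      simp only [h1, if_true]
      rw [List.map_cons, pvSumW_cons, ih, List.map_cons, List.sum_cons]
      show (if a ++ " " ++ b = k then ca * cnt b else 0) + ca * (Ds.map (fun b => cnt b * pvF k a b)).sum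
          = ca * (cnt b * pvF k a b + (Ds.map (fun b => cnt b * pvF k a b)).sum)
      by_cases hk : a ++ " " ++ b = k
      · simp only [hk, if_true, pvF, hab, if_false]
        ring
      · simp only [hk, if_false, pvF, hab]
        ring

lemma pvSumW_opB (s : List String) (k : String) :
    pvSumW (pvOpB s) k
      = ((PySem.List.dedup s).map (fun a => (s.count a : Int) *
          ((PySem.List.dedup s).map (fun b => (s.count b : Int) * pvF k a b)).sum)).sum := by
  rw [pvOpB, pvSumW_flatMap, PySem.Dict.items_counter, ← PySem.List.dedup, List.map_map]
  apply congrArg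
  apply List.map_congr_left
  intro a _
  simp only [Function.comp_apply]
  exact pvRowB (PySem.List.dedup s) (fun b => (s.count b : Int)) a (s.count a : Int) k

-- E1
lemma pvSumW_opA_opB (s : List String) (k : String) : pvSumW (pvOpA s) k = pvSumW (pvOpB s) k := by
  rw [pvSumW_opA, pvSumW_opB]
  have hinner : ∀ w, (s.map (fun v => pvF k w v)).sum
      = ((PySem.List.dedup s).map (fun b => (s.count b : Int) * pvF k w b)).sum := by
    intro w
    exact pvSum_count s (fun v => pvF k w v)
  calc (s.map (fun w => (s.map (fun v => pvF k w v)).sum)).sum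
      = (s.map (fun w => ((PySem.List.dedup s).map (fun b => (s.count b : Int) * pvF k w b)).sum)).sum := by
        apply congrArg; apply List.map_congr_left; intro w _; rw [hinner w]
    _ = ((PySem.List.dedup s).map (fun a => (s.count a : Int) *
          ((PySem.List.dedup s).map (fun b => (s.count b : Int) * pvF k a b)).sum)).sum :=
        pvSum_count s _

lemma pvKeyInj (a : String) : Function.Injective (fun b => a ++ " " ++ b) := by
  intro b c h
  exact (String.append_right_inj (a ++ " ")).mp (by simpa [String.append_assoc] using h)

lemma pvKeysA (s : List String) :
    (pvOpA s).map (·.1)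
      = s.flatMap (fun w => (s.filter (fun v => !(w == v))).map (fun v => w ++ " " ++ v)) := by
  rw [pvOpA, List.map_flatMap]
  have hf : (fun a => List.map (fun x : String × Int => x.1)
        (List.map (fun v => (a ++ " " ++ v, (1 : Int))) (List.filter (fun v => !(a == v)) s)))
      = (fun w => List.map (fun v => w ++ " " ++ v) (List.filter (fun v => !(w == v)) s)) := by
    funext w
    rw [List.map_map]
    rfl
  rw [hf]

lemma pvKeysB (s : List String) :
    (pvOpB s).map (·.1)
      = (PySem.List.dedup s).flatMap (fun a =>
          ((PySem.List.dedup s).filter (fun b => !(a == b))).map (fun b => a ++ " " ++ b)) := by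
  rw [pvOpB, List.map_flatMap, PySem.Dict.items_counter, ← PySem.List.dedup, List.flatMap_map]
  have hf : (fun a => List.map (fun x : String × Int => x.1)
        (List.map (fun pb : String × Int =>
            (((a, (s.count a : Int)) : String × Int).1 ++ " " ++ pb.1,
              ((a, (s.count a : Int)) : String × Int).2 * pb.2))
          (List.filter (fun pb : String × Int => !(((a, (s.count a : Int)) : String × Int).1 == pb.1))
            (List.map (fun k => (k, (s.count k : Int))) (PySem.List.dedup s)))))
      = (fun a => List.map (fun b => a ++ " " ++ b)
          (List.filter (fun b => !(a == b)) (PySem.List.dedup s))) := by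
    funext a
    rw [List.filter_map, List.map_map, List.map_map]
    have h1 : List.filter ((fun pb : String × Int =>
          !(((a, (s.count a : Int)) : String × Int).1 == pb.1)) ∘ (fun k => (k, (s.count k : Int))))
          (PySem.List.dedup s)
        = List.filter (fun b => !(a == b)) (PySem.List.dedup s) :=
      List.filter_congr (fun b _ => rfl)
    rw [h1]
    exact List.map_congr_left (fun b _ => rfl)
  rw [hf]

-- E2
lemma pvKeys_opA_opB (s : List String) :
    PySem.List.dedup ((pvOpA s).map (·.1)) = PySem.List.dedup ((pvOpB s).map (·.1)) := by
  rw [pvKeysA, pvKeysB, pvDedup_flatMap_dedup]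
  apply pvDedup_flatMap_congr
  intro a _
  rw [pvDedup_map_inj _ (pvKeyInj a), pvDedup_map_inj _ (pvKeyInj a),
    pvDedup_filter, pvDedup_filter, pvDedup_idem]

lemma pvInnerA (d : PySem.Dict String Int) (s : List String) (w : String) :
    s.foldl (fun edgeWeights wordDest =>
        if w ≠ wordDest then
          if edgeWeights.contains (w ++ " " ++ wordDest) = false then
            edgeWeights.insert (w ++ " " ++ wordDest) 1
          else
            edgeWeights.insert (w ++ " " ++ wordDest)
              (edgeWeights.getD (w ++ " " ++ wordDest) 0 + 1)
        else edgeWeights) d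
      = pvRun d ((s.filter (fun v => !(w == v))).map (fun v => (w ++ " " ++ v, (1 : Int)))) := by
  rw [← pvFoldl_guard s (fun v => !(w == v)) (fun v => (w ++ " " ++ v, (1 : Int))) d]
  have hb : (fun (ew : PySem.Dict String Int) wordDest =>
        if w ≠ wordDest then
          if ew.contains (w ++ " " ++ wordDest) = false then
            ew.insert (w ++ " " ++ wordDest) 1
          else
            ew.insert (w ++ " " ++ wordDest) (ew.getD (w ++ " " ++ wordDest) 0 + 1)
        else ew)
      = (fun (ew : PySem.Dict String Int) v =>
          if (!(w == v)) then pvAddN ew (w ++ " " ++ v, (1 : Int)) else ew) := by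
    funext ew v
    by_cases hwv : w = v
    · have h1 : (!(w == v)) = false := by simp [hwv]
      rw [if_neg (by simpa using hwv), h1]
      simp
    · have h1 : (!(w == v)) = true := by simp [hwv]
      rw [if_pos hwv, h1, if_pos rfl]
      by_cases hcont : ew.contains (w ++ " " ++ v)
      · rw [if_neg (by simp [hcont])]
        rfl
      · rw [if_pos (by simpa using hcont)]
        show ew.insert (w ++ " " ++ v) 1 = ew.insert (w ++ " " ++ v) (ew.getD (w ++ " " ++ v) 0 + 1)
        rw [PySem.Dict.getD_of_not_contains ew 0 (by simpa using hcont), Int.zero_add]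
  rw [hb]

lemma pvStepA (d : PySem.Dict String Int) (s : List String) :
    s.foldl (fun edgeWeights wordOrig =>
      s.foldl (fun edgeWeights wordDest =>
        if wordOrig ≠ wordDest then
          if edgeWeights.contains (wordOrig ++ " " ++ wordDest) = false then
            edgeWeights.insert (wordOrig ++ " " ++ wordDest) 1
          else
            edgeWeights.insert (wordOrig ++ " " ++ wordDest)
              (edgeWeights.getD (wordOrig ++ " " ++ wordDest) 0 + 1)
        else edgeWeights) edgeWeights) d = pvRun d (pvOpA s) := by
  have hb : (fun (ew : PySem.Dict String Int) wordOrig =>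
        s.foldl (fun edgeWeights wordDest =>
          if wordOrig ≠ wordDest then
            if edgeWeights.contains (wordOrig ++ " " ++ wordDest) = false then
              edgeWeights.insert (wordOrig ++ " " ++ wordDest) 1
            else
              edgeWeights.insert (wordOrig ++ " " ++ wordDest)
                (edgeWeights.getD (wordOrig ++ " " ++ wordDest) 0 + 1)
          else edgeWeights) ew)
      = (fun (ew : PySem.Dict String Int) w =>
          pvRun ew ((s.filter (fun v => !(w == v))).map (fun v => (w ++ " " ++ v, (1 : Int))))) := by
    funext ew w
    exact pvInnerA ew s w
  rw [hb, pvFoldl_run_flatMap]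
  rfl

lemma pvStepB (d : PySem.Dict String Int) (s : List String) :
    (let counts : PySem.Dict String Int :=
      s.foldl (fun counts w => counts.insert w (counts.getD w 0 + 1)) PySem.Dict.empty
    counts.items.foldl (fun edgeWeights pa =>
      counts.items.foldl (fun edgeWeights pb =>
        if pa.1 ≠ pb.1 then
          edgeWeights.insert (pa.1 ++ " " ++ pb.1)
            (edgeWeights.getD (pa.1 ++ " " ++ pb.1) 0 + pa.2 * pb.2)
        else edgeWeights) edgeWeights) d) = pvRun d (pvOpB s) := by
  show (PySem.Dict.counter s).items.foldl (fun edgeWeights pa =>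
      (PySem.Dict.counter s).items.foldl (fun edgeWeights pb =>
        if pa.1 ≠ pb.1 then
          edgeWeights.insert (pa.1 ++ " " ++ pb.1)
            (edgeWeights.getD (pa.1 ++ " " ++ pb.1) 0 + pa.2 * pb.2)
        else edgeWeights) edgeWeights) d = pvRun d (pvOpB s)
  have hinner : ∀ (pa : String × Int) (ew : PySem.Dict String Int),
      (PySem.Dict.counter s).items.foldl (fun edgeWeights pb =>
        if pa.1 ≠ pb.1 then
          edgeWeights.insert (pa.1 ++ " " ++ pb.1)
            (edgeWeights.getD (pa.1 ++ " " ++ pb.1) 0 + pa.2 * pb.2)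
        else edgeWeights) ew
      = pvRun ew (((PySem.Dict.counter s).items.filter (fun pb => !(pa.1 == pb.1))).map
          (fun pb => (pa.1 ++ " " ++ pb.1, pa.2 * pb.2))) := by
    intro pa ew
    rw [← pvFoldl_guard]
    have hb : (fun (ew : PySem.Dict String Int) (pb : String × Int) =>
          if pa.1 ≠ pb.1 then
            ew.insert (pa.1 ++ " " ++ pb.1) (ew.getD (pa.1 ++ " " ++ pb.1) 0 + pa.2 * pb.2)
          else ew)
        = (fun (ew : PySem.Dict String Int) pb =>
            if (!(pa.1 == pb.1)) then pvAddN ew (pa.1 ++ " " ++ pb.1, pa.2 * pb.2) else ew) := by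
      funext ew pb
      by_cases hab : pa.1 = pb.1
      · have h1 : (!(pa.1 == pb.1)) = false := by simp [hab]
        rw [if_neg (by simpa using hab), h1]
        simp
      · have h1 : (!(pa.1 == pb.1)) = true := by simp [hab]
        rw [if_pos hab, h1, if_pos rfl]
        rfl
    rw [hb]
  have hb2 : (fun (ew : PySem.Dict String Int) (pa : String × Int) =>
        (PySem.Dict.counter s).items.foldl (fun edgeWeights pb =>
          if pa.1 ≠ pb.1 then
            edgeWeights.insert (pa.1 ++ " " ++ pb.1)
              (edgeWeights.getD (pa.1 ++ " " ++ pb.1) 0 + pa.2 * pb.2)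
          else edgeWeights) ew)
      = (fun (ew : PySem.Dict String Int) pa =>
          pvRun ew (((PySem.Dict.counter s).items.filter (fun pb => !(pa.1 == pb.1))).map
            (fun pb => (pa.1 ++ " " ++ pb.1, pa.2 * pb.2)))) := by
    funext ew pa
    exact hinner pa ew
  rw [hb2, pvFoldl_run_flatMap]
  rfl

lemma pvStep_eq (d : PySem.Dict String Int) (hnd : d.keys.Nodup) (s : List String) :
    pvRun d (pvOpA s) = pvRun d (pvOpB s) := by
  apply PySem.Dict.ext
  rw [pvRun_items (pvOpA s) d hnd, pvRun_items (pvOpB s) d hnd, pvKeys_opA_opB]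
  congr 1
  · exact List.map_congr_left (fun q _ => by rw [pvSumW_opA_opB])
  · exact List.map_congr_left (fun k _ => by rw [pvSumW_opA_opB])

lemma pvMain (l : List (List String)) (d : PySem.Dict String Int) (hnd : d.keys.Nodup) :
    l.foldl (fun edgeWeights sentence =>
      sentence.foldl (fun edgeWeights wordOrig =>
        sentence.foldl (fun edgeWeights wordDest =>
          if wordOrig ≠ wordDest then
            if edgeWeights.contains (wordOrig ++ " " ++ wordDest) = false then
              edgeWeights.insert (wordOrig ++ " " ++ wordDest) 1
            else
              edgeWeights.insert (wordOrig ++ " " ++ wordDest)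
                (edgeWeights.getD (wordOrig ++ " " ++ wordDest) 0 + 1)
          else edgeWeights) edgeWeights) edgeWeights) d
    = l.foldl (fun edgeWeights sentence =>
      let counts : PySem.Dict String Int :=
        sentence.foldl (fun counts w => counts.insert w (counts.getD w 0 + 1)) PySem.Dict.empty
      counts.items.foldl (fun edgeWeights pa =>
        counts.items.foldl (fun edgeWeights pb =>
          if pa.1 ≠ pb.1 then
            edgeWeights.insert (pa.1 ++ " " ++ pb.1)
              (edgeWeights.getD (pa.1 ++ " " ++ pb.1) 0 + pa.2 * pb.2)
          else edgeWeights) edgeWeights) edgeWeights) d := by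
  induction l generalizing d with
  | nil => rfl
  | cons s l ih =>
    rw [List.foldl_cons, List.foldl_cons, pvStepA, pvStep_eq d hnd s, ← pvStepB]
    exact ih _ (by rw [pvStepB]; exact pvRun_nodup d (pvOpB s) hnd)

-- ===== VERDICT (by name: the statement is the Claim_ definition above) =====
theorem getEdgeWeights_spec : Claim_equal_getEdgeWeights := by
  intro kPhraseList _
  show getEdgeWeights kPhraseList = getEdgeWeights_alt kPhraseList
  rw [getEdgeWeights, getEdgeWeights_alt]
  exact congrArg PySem.Dict.items
    (pvMain kPhraseList PySem.Dict.empty PySem.Dict.nodup_keys_empty)
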